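-- pv_equiv track=rewrite | github.com/AdriiLosii/Vision_artificial | Practicas/P2/P2-Adrian_Losada_Alvarez/P2_backupCode.py | separate_x_y
-- ===== SOURCE A (Python) =====
-- def separate_x_y(lines):
--     lines_x = []
--     lines_y = []
--     if lines is not None:
--         for line in lines:
--             for x1, y1, x2, y2 in line:
--                 lines_x.extend([x1, x2])
--                 lines_y.extend([y1, y2])
--
--     return lines_x, lines_y
-- ===== SOURCE B (Python) =====
-- def separate_x_y(lines):
--     flat = [v for line in (lines if lines is not None else []) for seg in line for v in seg]
--     return flat[0::2], flat[1::2]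
-- ===== Notes on version B (the rewrite author's own statement) =====
-- stated objective: alternative
-- what changed: Replaces the two-accumulator extend-loop with a flatten-then-parity-slice strategy: one flat buffer of all coordinates in traversal order, then even-index and odd-index strided slices give xs and ys.
import Mathlib
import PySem

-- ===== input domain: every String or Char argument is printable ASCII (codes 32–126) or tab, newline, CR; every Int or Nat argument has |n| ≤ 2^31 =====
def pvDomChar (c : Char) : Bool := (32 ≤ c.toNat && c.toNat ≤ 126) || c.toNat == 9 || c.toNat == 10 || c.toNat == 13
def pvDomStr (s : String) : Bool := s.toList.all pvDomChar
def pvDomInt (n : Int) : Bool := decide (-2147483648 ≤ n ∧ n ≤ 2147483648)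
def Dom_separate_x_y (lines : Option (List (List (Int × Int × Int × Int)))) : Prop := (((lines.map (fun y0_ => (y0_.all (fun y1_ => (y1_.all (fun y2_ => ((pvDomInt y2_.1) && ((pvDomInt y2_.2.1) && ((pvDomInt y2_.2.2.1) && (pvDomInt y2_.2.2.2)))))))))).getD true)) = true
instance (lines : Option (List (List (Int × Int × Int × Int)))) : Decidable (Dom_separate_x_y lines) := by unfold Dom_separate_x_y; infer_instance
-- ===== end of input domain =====

-- ===== PORT A =====
def separate_x_y (lines : Option (List (List (Int × Int × Int × Int)))) : List Int × List Int :=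
  match lines with
  | none => ([], [])
  | some ls =>
    ls.foldl (fun acc line =>
      line.foldl (fun acc seg =>
        (acc.1 ++ [seg.1, seg.2.2.1], acc.2 ++ [seg.2.1, seg.2.2.2])) acc) ([], [])

-- ===== PORT B =====
-- B: flatten all coordinates in traversal order, then partition by index parity (flat[0::2], flat[1::2]).
mutual
def pvEvens : List Int → List Int
  | [] => []
  | a :: rest => a :: pvOdds rest
def pvOdds : List Int → List Int
  | [] => []
  | _ :: rest => pvEvens rest
end
def separate_x_y_alt (lines : Option (List (List (Int × Int × Int × Int)))) : List Int × List Int :=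
  let flat := ((lines.getD []).flatMap (fun line =>
    line.flatMap (fun seg => [seg.1, seg.2.1, seg.2.2.1, seg.2.2.2])))
  (pvEvens flat, pvOdds flat)

-- ===== PRECONDITION & SPEC =====
def Spec_separate_x_y (lines : Option (List (List (Int × Int × Int × Int)))) (out : List Int × List Int) : Prop := out = separate_x_y_alt lines
instance (lines : Option (List (List (Int × Int × Int × Int)))) (out : List Int × List Int) : Decidable (Spec_separate_x_y lines out) := by unfold Spec_separate_x_y; infer_instance

-- ===== CLAIM (what is proved, stated in full; the proofs are below) =====
def Claim_equal_separate_x_y : Prop := ∀ (lines : Option (List (List (Int × Int × Int × Int)))), Dom_separate_x_y lines → Spec_separate_x_y lines (separate_x_y lines)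

-- ===== LEMMAS AND PROOFS =====

-- ===== VERDICT (by name: the statement is the Claim_ definition above) =====
-- flatten one line's segments into the coordinate stream
def pvFlatLine (line : List (Int × Int × Int × Int)) : List Int :=
  line.flatMap (fun seg => [seg.1, seg.2.1, seg.2.2.1, seg.2.2.2])

theorem pvEvens_flatLine_append (line : List (Int × Int × Int × Int)) (rest : List Int) :
    pvEvens (pvFlatLine line ++ rest) = pvEvens (pvFlatLine line) ++ pvEvens rest ∧
    pvOdds (pvFlatLine line ++ rest) = pvOdds (pvFlatLine line) ++ pvOdds rest := by
  induction line with
  | nil => simp [pvFlatLine, pvEvens, pvOdds]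
  | cons s t ih =>
    simp only [pvFlatLine, List.flatMap_cons, List.append_assoc, List.cons_append,
      List.nil_append, pvEvens, pvOdds] at *
    exact ⟨by rw [ih.1], by rw [ih.2]⟩

theorem pvInner (line : List (Int × Int × Int × Int)) (acc : List Int × List Int) :
    line.foldl (fun acc seg =>
        (acc.1 ++ [seg.1, seg.2.2.1], acc.2 ++ [seg.2.1, seg.2.2.2])) acc
      = (acc.1 ++ pvEvens (pvFlatLine line), acc.2 ++ pvOdds (pvFlatLine line)) := by
  induction line generalizing acc with
  | nil => simp [pvFlatLine, pvEvens, pvOdds]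
  | cons s t ih =>
    simp only [List.foldl_cons, ih, pvFlatLine, List.flatMap_cons, List.cons_append,
      List.nil_append, pvEvens, pvOdds, List.append_assoc]

theorem pvOuter (ls : List (List (Int × Int × Int × Int))) (acc : List Int × List Int) :
    ls.foldl (fun acc line =>
        line.foldl (fun acc seg =>
          (acc.1 ++ [seg.1, seg.2.2.1], acc.2 ++ [seg.2.1, seg.2.2.2])) acc) acc
      = (acc.1 ++ pvEvens (ls.flatMap pvFlatLine), acc.2 ++ pvOdds (ls.flatMap pvFlatLine)) := by
  induction ls generalizing acc with
  | nil => simp [pvEvens, pvOdds]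
  | cons l t ih =>
    rw [List.foldl_cons, pvInner, ih, List.flatMap_cons,
      (pvEvens_flatLine_append l (t.flatMap pvFlatLine)).1,
      (pvEvens_flatLine_append l (t.flatMap pvFlatLine)).2]
    simp [List.append_assoc]

theorem separate_x_y_spec : Claim_equal_separate_x_y := by
  intro lines _
  unfold Spec_separate_x_y separate_x_y separate_x_y_alt
  cases lines with
  | none => simp [pvEvens, pvOdds]
  | some ls =>
    simp only [pvOuter, Option.getD_some, List.nil_append]
    rfl
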